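-- pv_equiv track=rewrite | github.com/listx/codenight | interp.py | solve
-- ===== SOURCE A (Python) =====
-- def solve(s):
-- 	n = 0
-- 	plusVal = 1
-- 	minusVal = -1
-- 	for c in s:
-- 		if c == '+':
-- 			n += plusVal
-- 		elif c == '-':
-- 			n += minusVal
-- 		elif c == 'x':
-- 			plusVal, minusVal = minusVal, plusVal
-- 	return n
-- ===== SOURCE B (Python) =====
-- def solve(s):
-- 	total = 0
-- 	sign = 1
-- 	for seg in s.split('x'):
-- 		total += sign * (seg.count('+') - seg.count('-'))
-- 		sign = -sign
-- 	return total
-- ===== Notes on version B (the rewrite author's own statement) =====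
-- stated objective: alternative
-- what changed: A's single streaming char loop with a sign-swapping (plusVal, minusVal) pair is replaced by splitting the string on 'x' and summing each segment's net count('+')-count('-') with an alternating sign (C-level split/count instead of a per-char Python loop).
import Mathlib
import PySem

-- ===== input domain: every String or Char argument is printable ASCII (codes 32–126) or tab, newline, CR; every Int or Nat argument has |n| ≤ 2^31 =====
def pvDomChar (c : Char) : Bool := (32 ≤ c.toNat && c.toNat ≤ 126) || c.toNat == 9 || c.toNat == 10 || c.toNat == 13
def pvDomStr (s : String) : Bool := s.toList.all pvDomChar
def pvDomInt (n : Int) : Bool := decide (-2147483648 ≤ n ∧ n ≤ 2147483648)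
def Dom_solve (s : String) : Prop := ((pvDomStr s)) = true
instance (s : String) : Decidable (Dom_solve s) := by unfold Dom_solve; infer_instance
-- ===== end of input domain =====

-- B replaces A's single streaming character loop (sign-swapping accumulator) by split-on-'x'
-- then a per-segment count aggregation with an alternating sign (objective: alternative decomposition; a timing run measured B faster).

-- ===== PORT A =====
-- A's 'for c in s' loop with state (n, plusVal, minusVal), as structural recursion.
def solveLoop : List Char → Int → Int → Int → Int
  | [], n, _, _ => n
  | c :: rest, n, p, m =>
    if c = '+' then solveLoop rest (n + p) p m
    else if c = '-' then solveLoop rest (n + m) p m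
    else if c = 'x' then solveLoop rest n m p
    else solveLoop rest n p m

def solve (s : String) : Int := solveLoop s.toList 0 1 (-1)

-- ===== PORT B =====
-- B's 'for seg in s.split('x')' loop with state (total, sign), as structural recursion.
def solveAltLoop : List (List Char) → Int → Int → Int
  | [], total, _ => total
  | seg :: rest, total, sign =>
      solveAltLoop rest
        (total + sign * ((PySem.Chars.count seg ['+'] : Int) - (PySem.Chars.count seg ['-'] : Int)))
        (-sign)

def solve_alt (s : String) : Int :=
  solveAltLoop (PySem.Chars.splitOn s.toList ['x']) 0 1

-- ===== PRECONDITION & SPEC =====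
def Spec_solve (s : String) (out : Int) : Prop := out = solve_alt s
instance (s : String) (out : Int) : Decidable (Spec_solve s out) := by unfold Spec_solve; infer_instance

-- ===== CLAIM (what is proved, stated in full; the proofs are below) =====
def Claim_equal_solve : Prop := ∀ (s : String), Dom_solve s → Spec_solve s (solve s)

-- ===== LEMMAS AND PROOFS =====

-- count of a single-character pattern is List.count
theorem count_go_single (c : Char) :
    ∀ (fuel : Nat) (l : List Char) (acc : Nat), l.length ≤ fuel →
      PySem.Chars.count.go [c] fuel l acc = acc + l.count c := by
  intro fuel
  induction fuel with
  | zero =>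
      intro l acc h
      have : l = [] := List.eq_nil_of_length_eq_zero (Nat.le_zero.mp h)
      subst this
      simp [PySem.Chars.count.go]
  | succ fuel ih =>
      intro l acc h
      cases l with
      | nil => simp [PySem.Chars.count.go]
      | cons hd t =>
          simp only [PySem.Chars.count.go]
          by_cases hc : hd = c
          · subst hc
            simp only [List.isPrefixOf, BEq.rfl, Bool.and_self, if_true, List.length_cons,
              List.length_nil, List.drop_succ_cons, List.drop_zero]
            rw [ih t (acc + 1) (Nat.le_of_succ_le_succ (by simpa using h))]
            simp [List.count_cons]
            omega
          · have : ([c].isPrefixOf (hd :: t)) = false := by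
              simp [List.isPrefixOf, Ne.symm hc]
            rw [this]
            simp only [Bool.false_eq_true, if_false]
            rw [ih t acc (Nat.le_of_succ_le_succ h)]
            simpa [List.count_cons] using hc

theorem count_single (l : List Char) (c : Char) :
    PySem.Chars.count l [c] = l.count c := by
  simp [PySem.Chars.count, List.isEmpty]
  simpa using count_go_single c l.length l 0 le_rfl

-- structural characterisation of splitOn with a one-character separator
def splitAux (x : Char) : List Char → List Char → List (List Char)
  | [], cur => [cur.reverse]
  | c :: t, cur => if c = x then cur.reverse :: splitAux x t [] else splitAux x t (c :: cur)

theorem splitOn_go_single (x : Char) :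
    ∀ (fuel : Nat) (l cur : List Char) (acc : List (List Char)), l.length ≤ fuel →
      PySem.Chars.splitOn.go [x] fuel l cur acc = acc.reverse ++ splitAux x l cur := by
  intro fuel
  induction fuel with
  | zero =>
      intro l cur acc h
      have : l = [] := List.eq_nil_of_length_eq_zero (Nat.le_zero.mp h)
      subst this
      simp [PySem.Chars.splitOn.go, splitAux]
  | succ fuel ih =>
      intro l cur acc h
      cases l with
      | nil => simp [PySem.Chars.splitOn.go, splitAux]
      | cons hd t =>
          simp only [PySem.Chars.splitOn.go]
          by_cases hc : hd = x
          · subst hc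
            simp only [List.isPrefixOf, BEq.rfl, Bool.and_self, if_true, List.length_cons,
              List.length_nil, List.drop_succ_cons, List.drop_zero]
            rw [ih t [] (cur.reverse :: acc) (Nat.le_of_succ_le_succ (by simpa using h))]
            simp [splitAux]
          · have : ([x].isPrefixOf (hd :: t)) = false := by
              simp [List.isPrefixOf, Ne.symm hc]
            rw [this]
            simp only [Bool.false_eq_true, if_false]
            rw [ih t (hd :: cur) acc (Nat.le_of_succ_le_succ h)]
            simp [splitAux, hc]

theorem splitOn_single (l : List Char) (x : Char) :
    PySem.Chars.splitOn l [x] = splitAux x l [] := by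
  have := splitOn_go_single x (l.length + 1) l [] [] (Nat.le_succ _)
  simpa [PySem.Chars.splitOn] using this

-- the net contribution of a segment
def net (l : List Char) : Int := (l.count '+' : Int) - (l.count '-' : Int)

-- B's aggregation over the split equals A's streaming loop
theorem main_lemma :
    ∀ (l cur : List Char) (t sgn : Int),
      solveAltLoop (splitAux 'x' l cur) t sgn = solveLoop l (t + sgn * net cur) sgn (-sgn) := by
  intro l
  induction l with
  | nil =>
      intro cur t sgn
      simp [splitAux, solveAltLoop, solveLoop, count_single, net]
  | cons c rest ih =>
      intro cur t sgn
      by_cases hc : c = 'x'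
      · subst hc
        simp only [splitAux, if_true, solveAltLoop, reduceIte]
        rw [ih [] _ (-sgn)]
        simp [solveLoop, net, count_single, mul_sub]
      · simp only [splitAux, if_neg hc, solveLoop]
        rw [ih (c :: cur) t sgn]
        by_cases hp : c = '+'
        · subst hp
          simp [solveLoop, net, List.count_cons]
          ring_nf
        · by_cases hm : c = '-'
          · subst hm
            simp [solveLoop, hp, net, List.count_cons]
            ring_nf
          · simp [solveLoop, hp, hm, hc, net, List.count_cons]

-- ===== VERDICT (by name: the statement is the Claim_ definition above) =====
theorem solve_spec : Claim_equal_solve := by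
  intro s _
  unfold Spec_solve solve solve_alt
  rw [splitOn_single, main_lemma]
  simp [net]
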